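-- pv_equiv track=rewrite | github.com/alexispapayan/NN_remeshing | Triangulation_with_points.py | check_edge_validity
-- ===== SOURCE A (Python) =====
-- from itertools import permutations
--
-- def check_edge_validity(edge,polygon,set_edges,interior_edges):
--     # Check if new edges are already in the set
--     found_in_set=False
--     found_in_interior_set=False
--     for index in range(len(polygon)+1):
--         occuring_index=index
--
--         edge1,edge2=tuple(permutations((edge[0],index))),tuple(permutations((edge[1],index)))
--         condition1= edge1[0] in set_edges or edge1[1] in set_edges
--         condition2= edge2[0] in set_edges or edge2[1] in set_edges
--         condition3= edge1[0] in interior_edges or edge1[1] in interior_edges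
--         condition4= edge2[0] in interior_edges or edge2[1] in interior_edges
--
--
--             # both edges are found in the list of set of edges (Invalid)
--         if (condition1 and condition2):
--             found_in_set=True
--             occuring_index=index
--
--
--         # both edges are found in the list of interior edges created
--         if (condition3 and condition4):
--             found_in_interior_set=True
--             occuring_index=index
--
--         if found_in_interior_set or found_in_set:
--             break
--     return found_in_interior_set,found_in_set,occuring_index
-- ===== SOURCE B (Python) =====
-- def check_edge_validity(edge, polygon, set_edges, interior_edges):
--     n = len(polygon)
--     a, b = edge[0], edge[1]
--
--     def common(edges):
--         na = {v for (u, v) in edges if u == a} | {u for (u, v) in edges if v == a}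
--         nb = {v for (u, v) in edges if u == b} | {u for (u, v) in edges if v == b}
--         return na & nb
--
--     sc = common(set_edges)
--     ic = common(interior_edges)
--     cand = [i for i in sc | ic if 0 <= i <= n]
--     if not cand:
--         return (False, False, n)
--     i = min(cand)
--     return (i in ic, i in sc, i)
-- ===== Notes on version B (the rewrite author's own statement) =====
-- stated objective: faster
-- what changed: Instead of rescanning both edge lists for every candidate index, B builds the common-neighbor sets of edge[0] and edge[1] once per edge list, restricts their union to 0..len(polygon), and returns the minimum qualifying index with its two membership flags (len(polygon) with false flags if none).
import Mathlib
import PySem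

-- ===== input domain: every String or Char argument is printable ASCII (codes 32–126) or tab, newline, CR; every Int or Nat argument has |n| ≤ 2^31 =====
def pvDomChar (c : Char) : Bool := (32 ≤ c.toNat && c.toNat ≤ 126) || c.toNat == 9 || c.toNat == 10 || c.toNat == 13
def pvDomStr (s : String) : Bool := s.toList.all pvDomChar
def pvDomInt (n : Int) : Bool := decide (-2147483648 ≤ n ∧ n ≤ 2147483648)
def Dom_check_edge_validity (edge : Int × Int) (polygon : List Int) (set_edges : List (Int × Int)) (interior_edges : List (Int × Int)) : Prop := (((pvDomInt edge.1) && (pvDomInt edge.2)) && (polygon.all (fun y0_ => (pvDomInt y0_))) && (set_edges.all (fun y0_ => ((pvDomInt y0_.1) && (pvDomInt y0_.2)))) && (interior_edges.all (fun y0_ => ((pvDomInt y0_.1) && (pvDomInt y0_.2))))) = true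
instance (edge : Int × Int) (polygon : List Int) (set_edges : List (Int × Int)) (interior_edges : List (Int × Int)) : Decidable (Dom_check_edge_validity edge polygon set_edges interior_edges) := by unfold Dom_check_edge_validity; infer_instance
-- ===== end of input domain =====

-- B replaces A's per-index rescans by common-neighbor sets (intersection of the neighbors of
-- edge[0] and edge[1] in each edge list) and takes the minimum qualifying index; same return value.

-- ===== PORT A =====
-- cond helper: 'edge1[0] in edges or edge1[1] in edges' and same for edge[1] (both orientations)
def ceCond (edge : Int × Int) (edges : List (Int × Int)) (i : Int) : Bool :=
  (edges.contains (edge.1, i) || edges.contains (i, edge.1)) &&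
  (edges.contains (edge.2, i) || edges.contains (i, edge.2))

-- the for-loop with early break (occuring_index is set to the current index each iteration)
def ceLoopA (edge : Int × Int) (se ie : List (Int × Int)) :
    List Int → Bool → Bool → Int → Bool × Bool × Int
  | [], fis, fs, occ => (fis, fs, occ)
  | i :: rest, fis, fs, _ =>
    let fs' := if ceCond edge se i then true else fs
    let fis' := if ceCond edge ie i then true else fis
    if fis' || fs' then (fis', fs', i) else ceLoopA edge se ie rest fis' fs' i

def check_edge_validity (edge : Int × Int) (polygon : List Int) (set_edges : List (Int × Int)) (interior_edges : List (Int × Int)) : Bool × Bool × Int :=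
  ceLoopA edge set_edges interior_edges
    (PySem.List.pyRange 0 ((polygon.length : Int) + 1) 1) false false 0

-- ===== PORT B =====
-- {v for (u,v) in edges if u == x} | {u for (u,v) in edges if v == x}
def ceNeigh (x : Int) (edges : List (Int × Int)) : PySem.Set Int :=
  PySem.Set.union (PySem.Set.ofList ((edges.filter (fun p => p.1 == x)).map (·.2)))
    ((edges.filter (fun p => p.2 == x)).map (·.1))

def ceCommon (edge : Int × Int) (edges : List (Int × Int)) : PySem.Set Int :=
  PySem.Set.inter (ceNeigh edge.1 edges) (ceNeigh edge.2 edges)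

def ceCand (edge : Int × Int) (polygon : List Int) (set_edges : List (Int × Int)) (interior_edges : List (Int × Int)) : List Int :=
  (PySem.Set.union (ceCommon edge set_edges) (ceCommon edge interior_edges)).filter
    (fun i => decide (0 ≤ i) && decide (i ≤ (polygon.length : Int)))

def check_edge_validity_alt (edge : Int × Int) (polygon : List Int) (set_edges : List (Int × Int)) (interior_edges : List (Int × Int)) : Bool × Bool × Int :=
  match PySem.List.min? (ceCand edge polygon set_edges interior_edges) (fun x => x) with
  | none => (false, false, (polygon.length : Int))
  | some i => (PySem.Set.contains (ceCommon edge interior_edges) i,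
               PySem.Set.contains (ceCommon edge set_edges) i, i)

-- ===== PRECONDITION & SPEC =====
def Spec_check_edge_validity (edge : Int × Int) (polygon : List Int) (set_edges : List (Int × Int)) (interior_edges : List (Int × Int)) (out : Bool × Bool × Int) : Prop := out = check_edge_validity_alt edge polygon set_edges interior_edges
instance (edge : Int × Int) (polygon : List Int) (set_edges : List (Int × Int)) (interior_edges : List (Int × Int)) (out : Bool × Bool × Int) : Decidable (Spec_check_edge_validity edge polygon set_edges interior_edges out) := by unfold Spec_check_edge_validity; infer_instance

-- ===== CLAIM (what is proved, stated in full; the proofs are below) =====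
def Claim_equal_check_edge_validity : Prop := ∀ (edge : Int × Int) (polygon : List Int) (set_edges : List (Int × Int)) (interior_edges : List (Int × Int)), Dom_check_edge_validity edge polygon set_edges interior_edges → Spec_check_edge_validity edge polygon set_edges interior_edges (check_edge_validity edge polygon set_edges interior_edges)

-- ===== LEMMAS AND PROOFS =====

-- membership in a neighbor set
theorem mem_ceNeigh (x : Int) (edges : List (Int × Int)) (i : Int) :
    i ∈ ceNeigh x edges ↔ (x, i) ∈ edges ∨ (i, x) ∈ edges := by
  simp only [ceNeigh, PySem.Set.mem_union, PySem.Set.mem_ofList, List.mem_map, List.mem_filter,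
    beq_iff_eq]
  constructor
  · rintro (⟨p, ⟨hp, h1⟩, h2⟩ | ⟨p, ⟨hp, h1⟩, h2⟩)
    · exact Or.inl (by rwa [show (x, i) = p from by ext <;> simp [h1, h2]])
    · exact Or.inr (by rwa [show (i, x) = p from by ext <;> simp [h1, h2]])
  · rintro (h | h)
    · exact Or.inl ⟨(x, i), ⟨h, rfl⟩, rfl⟩
    · exact Or.inr ⟨(i, x), ⟨h, rfl⟩, rfl⟩

theorem mem_ceCommon (edge : Int × Int) (edges : List (Int × Int)) (i : Int) :
    i ∈ ceCommon edge edges ↔ ceCond edge edges i = true := by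
  simp only [ceCommon, PySem.Set.mem_inter, mem_ceNeigh, ceCond, Bool.and_eq_true,
    Bool.or_eq_true, List.contains_iff_mem]

theorem contains_ceCommon (edge : Int × Int) (edges : List (Int × Int)) (i : Int) :
    PySem.Set.contains (ceCommon edge edges) i = ceCond edge edges i := by
  by_cases h : ceCond edge edges i = true
  · rw [h]; exact (PySem.Set.contains_iff _ _).2 ((mem_ceCommon _ _ _).2 h)
  · simp only [Bool.not_eq_true] at h; rw [h]
    by_contra hc
    simp only [Bool.not_eq_false] at hc
    have := (mem_ceCommon edge edges i).1 ((PySem.Set.contains_iff _ _).1 hc)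
    simp [this] at h

-- min of a list whose members are exactly the p-satisfying members of a strictly ascending list
-- equals find? p over that list
theorem min_eq_find (p : Int → Bool) :
    ∀ (l c : List Int), l.Pairwise (· < ·) → (∀ i, i ∈ c ↔ i ∈ l ∧ p i = true) →
    PySem.List.min? c (fun x => x) = l.find? p
  | [], c, _, hc => by
    have : c = [] := List.eq_nil_iff_forall_not_mem.2 (fun i hi => by simp [hc i] at hi)
    simp [this, PySem.List.min?]
  | a :: t, c, hl, hc => by
    rcases List.pairwise_cons.1 hl with ⟨ha, ht⟩
    by_cases hpa : p a = true
    · have hac : a ∈ c := (hc a).2 ⟨List.mem_cons_self, hpa⟩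
      have hmin : ∀ y ∈ c, a ≤ y := by
        intro y hy
        rcases (hc y).1 hy with ⟨hyl, _⟩
        rcases List.mem_cons.1 hyl with rfl | hyt
        · exact le_refl _
        · exact le_of_lt (ha y hyt)
      rw [List.find?_cons_of_pos hpa]
      cases hm : PySem.List.min? c (fun x => x) with
      | none => exact absurd ((PySem.List.min?_eq_none_iff _ _).1 hm ▸ hac) (List.not_mem_nil)
      | some m =>
        have hmc := PySem.List.min?_mem hm
        have hle := PySem.List.min?_isMin hm
        have : m = a := le_antisymm (hle a hac) (hmin m hmc)
        rw [this]
    · rw [List.find?_cons_of_neg (by simp [hpa])]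
      refine min_eq_find p t c ht (fun i => ?_)
      rw [hc i, List.mem_cons]
      constructor
      · rintro ⟨rfl | hit, hpi⟩
        · exact absurd hpi hpa
        · exact ⟨hit, hpi⟩
      · rintro ⟨hit, hpi⟩; exact ⟨Or.inr hit, hpi⟩

-- A's loop, started with both flags false, finds the first qualifying index
theorem ceLoopA_char (edge : Int × Int) (se ie : List (Int × Int)) :
    ∀ (l : List Int) (occ : Int),
    ceLoopA edge se ie l false false occ =
      match l.find? (fun i => ceCond edge ie i || ceCond edge se i) with
      | some i => (ceCond edge ie i, ceCond edge se i, i)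
      | none => (false, false, l.getLastD occ)
  | [], occ => by simp [ceLoopA]
  | i :: rest, occ => by
    by_cases h : (ceCond edge ie i || ceCond edge se i) = true
    · rw [List.find?_cons_of_pos (p := fun i => ceCond edge ie i || ceCond edge se i) h]
      simp only [Bool.or_eq_true] at h
      simp only [ceLoopA]
      rcases Bool.eq_false_or_eq_true (ceCond edge ie i) with hie | hie <;>
        rcases Bool.eq_false_or_eq_true (ceCond edge se i) with hse | hse <;>
        simp [hie, hse] at h ⊢
    · rw [List.find?_cons_of_neg (p := fun i => ceCond edge ie i || ceCond edge se i) (by simp [h])]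
      simp only [Bool.or_eq_true, not_or, Bool.not_eq_true] at h
      simp only [ceLoopA, h.1, h.2, Bool.or_self, List.getLastD_cons]
      exact ceLoopA_char edge se ie rest i

-- ===== VERDICT (by name: the statement is the Claim_ definition above) =====
theorem check_edge_validity_spec : Claim_equal_check_edge_validity := by
  intro edge polygon se ie _
  unfold Spec_check_edge_validity check_edge_validity check_edge_validity_alt
  have h0n : (0 : Int) ≤ (polygon.length : Int) := by positivity
  rw [ceLoopA_char]
  have hc : ∀ i, i ∈ ceCand edge polygon se ie ↔
      i ∈ PySem.List.pyRange 0 ((polygon.length : Int) + 1) 1 ∧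
        (ceCond edge ie i || ceCond edge se i) = true := by
    intro i
    simp only [ceCand, List.mem_filter, PySem.Set.mem_union, mem_ceCommon,
      PySem.List.mem_pyRange_one, Bool.and_eq_true, Bool.or_eq_true, decide_eq_true_eq]
    constructor
    · rintro ⟨hor, h0, h1⟩; exact ⟨⟨h0, by omega⟩, hor.symm⟩
    · rintro ⟨⟨h0, h1⟩, hor⟩; exact ⟨hor.symm, h0, by omega⟩
  rw [min_eq_find _ _ _ (PySem.List.pairwise_lt_pyRange_one 0 ((polygon.length : Int) + 1)) hc]
  cases hf : (PySem.List.pyRange 0 ((polygon.length : Int) + 1) 1).find?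
      (fun i => ceCond edge ie i || ceCond edge se i) with
  | none =>
    simp only
    rw [PySem.List.pyRange_one_succ_right h0n]
    simp [List.getLastD_eq_getLast?, List.getLast?_append]
  | some i =>
    simp only [contains_ceCommon]
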